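-- pv_equiv track=rewrite | github.com/corpetty/mozeika-pruning-empirics | kv-subspace/demo.py | builtin_long_doc
-- ===== SOURCE A (Python) =====
-- def builtin_long_doc(n_chars: int = 120_000) -> str:
--     """Generate a synthetic long document: rotating scientific paragraphs."""
--     paras = [
--         ("Thermodynamics is the branch of physics that deals with heat, work, and "
--          "temperature, and their relation to energy, entropy, and the physical "
--          "properties of matter and radiation. The behavior of these quantities is "
--          "governed by the four laws of thermodynamics which convey a quantitative "
--          "description using measurable macroscopic physical quantities, but may be "
--          "explained in terms of microscopic constituents by statistical mechanics."),
--         ("The theory of evolution by natural selection was first formulated in "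
--          "Charles Darwin's book On the Origin of Species in 1859. According to "
--          "natural selection, organisms with heritable traits that help them "
--          "adapt to their environment tend to survive and reproduce more "
--          "successfully than others of their kind, thereby ensuring the "
--          "proliferation of those traits in future generations."),
--         ("A neural network is a series of algorithms that endeavors to recognize "
--          "underlying relationships in a set of data through a process that mimics "
--          "the way the human brain operates. Neural networks can adapt to changing "
--          "input so the network generates the best possible result without needing "
--          "to redesign the output criteria."),
--         ("The Silk Road was a network of trade routes which connected the East "
--          "and West, and was central to the economic, cultural, political, and "
--          "religious interactions between these regions from the 2nd century BCE "
--          "to the 18th century. The Silk Road derives its name from the lucrative "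
--          "trade in silk carried out along its length, beginning in the Han dynasty "
--          "of China."),
--         ("In mathematics, the Riemann hypothesis is a conjecture that the Riemann "
--          "zeta function has its zeros only at the negative even integers and "
--          "complex numbers with real part 1/2. Many consider it to be the most "
--          "important unsolved problem in pure mathematics. It is one of the seven "
--          "Millennium Prize Problems selected by the Clay Mathematics Institute."),
--     ]
--     text = ""
--     while len(text) < n_chars:
--         for p in paras:
--             text += p + "\n\n"
--             if len(text) >= n_chars:
--                 break
--     return text[:n_chars]
-- ===== SOURCE B (Python) =====
-- def builtin_long_doc(n_chars: int = 120_000) -> str: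
--     """Generate a synthetic long document: rotating scientific paragraphs."""
--     paras = [
--         "Thermodynamics is the branch of physics that deals with heat, work, and temperature, and their relation to energy, entropy, and the physical properties of matter and radiation. The behavior of these quantities is governed by the four laws of thermodynamics which convey a quantitative description using measurable macroscopic physical quantities, but may be explained in terms of microscopic constituents by statistical mechanics.",
--         "The theory of evolution by natural selection was first formulated in Charles Darwin's book On the Origin of Species in 1859. According to natural selection, organisms with heritable traits that help them adapt to their environment tend to survive and reproduce more successfully than others of their kind, thereby ensuring the proliferation of those traits in future generations.",
--         "A neural network is a series of algorithms that endeavors to recognize underlying relationships in a set of data through a process that mimics the way the human brain operates. Neural networks can adapt to changing input so the network generates the best possible result without needing to redesign the output criteria.",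
--         "The Silk Road was a network of trade routes which connected the East and West, and was central to the economic, cultural, political, and religious interactions between these regions from the 2nd century BCE to the 18th century. The Silk Road derives its name from the lucrative trade in silk carried out along its length, beginning in the Han dynasty of China.",
--         "In mathematics, the Riemann hypothesis is a conjecture that the Riemann zeta function has its zeros only at the negative even integers and complex numbers with real part 1/2. Many consider it to be the most important unsolved problem in pure mathematics. It is one of the seven Millennium Prize Problems selected by the Clay Mathematics Institute.",
--     ]
--     block = "".join(p + "\n\n" for p in paras)
--     reps = n_chars // len(block) + 1
--     return (block * reps)[:n_chars]
-- ===== Notes on version B (the rewrite author's own statement) =====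
-- stated objective: alternative
-- what changed: Replaces A's incremental while/for append-with-break loop by building the fixed paragraph period block once, tiling it enough times (floor-division of n_chars by the block length, plus one), and truncating to n_chars.
import Mathlib
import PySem

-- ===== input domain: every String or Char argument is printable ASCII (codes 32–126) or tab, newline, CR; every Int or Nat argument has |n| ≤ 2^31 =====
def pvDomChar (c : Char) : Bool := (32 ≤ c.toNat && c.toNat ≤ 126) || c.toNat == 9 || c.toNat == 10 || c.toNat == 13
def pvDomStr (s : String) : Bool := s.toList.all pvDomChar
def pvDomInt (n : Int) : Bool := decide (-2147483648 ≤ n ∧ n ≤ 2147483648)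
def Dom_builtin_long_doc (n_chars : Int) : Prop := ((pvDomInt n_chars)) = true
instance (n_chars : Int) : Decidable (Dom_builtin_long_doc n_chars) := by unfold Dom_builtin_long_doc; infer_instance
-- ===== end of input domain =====

-- B builds the fixed paragraph period once and tiles-and-truncates it, replacing A's incremental while/for append-with-break loop (different decomposition; no speed claim).

-- ===== PORT A =====
-- strings are modelled as List Char (exact: slices/length are code-point-wise)
def pvParas : List String := [
    "Thermodynamics is the branch of physics that deals with heat, work, and temperature, and their relation to energy, entropy, and the physical properties of matter and radiation. The behavior of these quantities is governed by the four laws of thermodynamics which convey a quantitative description using measurable macroscopic physical quantities, but may be explained in terms of microscopic constituents by statistical mechanics.",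
    "The theory of evolution by natural selection was first formulated in Charles Darwin's book On the Origin of Species in 1859. According to natural selection, organisms with heritable traits that help them adapt to their environment tend to survive and reproduce more successfully than others of their kind, thereby ensuring the proliferation of those traits in future generations.",
    "A neural network is a series of algorithms that endeavors to recognize underlying relationships in a set of data through a process that mimics the way the human brain operates. Neural networks can adapt to changing input so the network generates the best possible result without needing to redesign the output criteria.",
    "The Silk Road was a network of trade routes which connected the East and West, and was central to the economic, cultural, political, and religious interactions between these regions from the 2nd century BCE to the 18th century. The Silk Road derives its name from the lucrative trade in silk carried out along its length, beginning in the Han dynasty of China.",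
    "In mathematics, the Riemann hypothesis is a conjecture that the Riemann zeta function has its zeros only at the negative even integers and complex numbers with real part 1/2. Many consider it to be the most important unsolved problem in pure mathematics. It is one of the seven Millennium Prize Problems selected by the Clay Mathematics Institute."
  ]

-- the body of A's inner 'for p in paras' loop with its 'break'
def pvInner (n : Int) : List String → List Char → List Char
  | [], text => text
  | p :: ps, text =>
      let t := text ++ (p.toList ++ ['\n', '\n'])
      if n ≤ (t.length : Int) then t else pvInner n ps t

-- termination lemmas for the while loop (cited by decreasing_by)
theorem pvInner_length_le (n : Int) (ps : List String) (text : List Char) :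
    text.length ≤ (pvInner n ps text).length := by
  induction ps generalizing text with
  | nil => simp [pvInner]
  | cons p ps ih =>
      simp only [pvInner]
      split
      · simp
      · exact le_trans (by simp) (ih (text ++ (p.toList ++ ['\n', '\n'])))

theorem pvInner_grows (n : Int) (ps : List String) (h : ps ≠ []) (text : List Char) :
    text.length < (pvInner n ps text).length := by
  cases ps with
  | nil => exact absurd rfl h
  | cons p ps =>
      simp only [pvInner]
      split
      · simp
      · exact lt_of_lt_of_le (by simp) (pvInner_length_le n ps _)

theorem pvParas_ne_nil : pvParas ≠ [] := by unfold pvParas; exact List.cons_ne_nil _ _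

-- A's 'while len(text) < n_chars' loop
def pvWhile (n : Int) (text : List Char) : List Char :=
  if (text.length : Int) < n then pvWhile n (pvInner n pvParas text) else text
termination_by (n - text.length).toNat
decreasing_by
  have h := pvInner_grows n pvParas pvParas_ne_nil text
  omega

def builtin_long_doc (n_chars : Int) : String :=
  String.ofList (PySem.List.slice (pvWhile n_chars []) none (some n_chars))

-- ===== PORT B =====
def builtin_long_doc_alt (n_chars : Int) : String :=
  let block : List Char := (pvParas.map (fun p => p.toList ++ ['\n', '\n'])).flatten
  let reps : Int := PySem.Int.floordiv n_chars (block.length : Int) + 1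
  String.ofList (PySem.List.slice (PySem.List.pyRepeat block reps) none (some n_chars))

-- ===== PRECONDITION & SPEC =====
def Spec_builtin_long_doc (n_chars : Int) (out : String) : Prop := out = builtin_long_doc_alt n_chars
instance (n_chars : Int) (out : String) : Decidable (Spec_builtin_long_doc n_chars out) := by unfold Spec_builtin_long_doc; infer_instance

-- ===== CLAIM (what is proved, stated in full; the proofs are below) =====
def Claim_equal_builtin_long_doc : Prop := ∀ (n_chars : Int), Dom_builtin_long_doc n_chars → Spec_builtin_long_doc n_chars (builtin_long_doc n_chars)

-- ===== LEMMAS AND PROOFS =====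
def pvBlockOf (ps : List String) : List Char :=
  (ps.map (fun p => p.toList ++ ['\n', '\n'])).flatten

def pvBlock : List Char := pvBlockOf pvParas

def pvR (k : Nat) : List Char := (List.replicate k pvBlock).flatten

theorem pvBlockOf_cons (p : String) (ps : List String) :
    pvBlockOf (p :: ps) = (p.toList ++ ['\n', '\n']) ++ pvBlockOf ps := by
  simp [pvBlockOf]

theorem pvBlock_pos : 0 < pvBlock.length := by
  obtain ⟨p, ps, hp⟩ := List.exists_cons_of_ne_nil pvParas_ne_nil
  rw [pvBlock, hp, pvBlockOf_cons]
  simp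

theorem pvR_add (a b : Nat) : pvR (a + b) = pvR a ++ pvR b := by
  rw [pvR, pvR, pvR, List.replicate_add, List.flatten_append]

theorem pvR_succ (k : Nat) : pvR (k + 1) = pvR k ++ pvBlock := by
  have h1 : pvR 1 = pvBlock := by simp [pvR]
  rw [pvR_add, h1]

theorem pvR_length (k : Nat) : (pvR k).length = k * pvBlock.length := by
  induction k with
  | zero => simp [pvR]
  | succ k ih => rw [pvR_succ]; simp [ih]; ring

theorem pvR_prefix {a b : Nat} (h : a ≤ b) : pvR a <+: pvR b := by
  refine ⟨pvR (b - a), ?_⟩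
  rw [← pvR_add, Nat.add_sub_cancel' h]

theorem pvInner_shape (n : Int) (ps : List String) (text : List Char) :
    ∃ t, pvInner n ps text = text ++ t ∧ t <+: pvBlockOf ps ∧
      (t = pvBlockOf ps ∨ n ≤ ((text.length : Int) + t.length)) := by
  induction ps generalizing text with
  | nil => exact ⟨[], by simp [pvInner, pvBlockOf]⟩
  | cons p ps ih =>
      simp only [pvInner]
      split
      · next hc =>
        refine ⟨p.toList ++ ['\n', '\n'], by simp,
          ⟨pvBlockOf ps, (pvBlockOf_cons p ps).symm⟩, Or.inr ?_⟩
        simp only [List.length_append] at hc ⊢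
        push_cast at hc ⊢
        omega
      · obtain ⟨t, ht, hpre, hca⟩ := ih (text ++ (p.toList ++ ['\n', '\n']))
        obtain ⟨u, hu⟩ := hpre
        refine ⟨(p.toList ++ ['\n', '\n']) ++ t, by simp [ht], ?_, ?_⟩
        · exact ⟨u, by rw [pvBlockOf_cons, ← hu, List.append_assoc]⟩
        · rcases hca with h1 | h2
          · exact Or.inl (by rw [pvBlockOf_cons, h1])
          · refine Or.inr ?_
            simp only [List.length_append] at h2 ⊢
            push_cast at h2 ⊢
            omega

theorem pvWhile_good (n : Int) (m : Nat) (j : Nat)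
    (hm : (n - ((pvR j).length : Int)).toNat ≤ m) :
    ∃ k, pvWhile n (pvR j) <+: pvR k ∧ n ≤ ((pvWhile n (pvR j)).length : Int) := by
  induction m generalizing j with
  | zero =>
      have hle : n ≤ ((pvR j).length : Int) := by omega
      rw [pvWhile, if_neg (by omega)]
      exact ⟨j, List.prefix_refl _, hle⟩
  | succ m ih =>
      by_cases h : ((pvR j).length : Int) < n
      · rw [pvWhile, if_pos h]
        obtain ⟨t, ht, hpre, hca⟩ := pvInner_shape n pvParas (pvR j)
        rcases hca with h1 | h2
        · have hs : pvInner n pvParas (pvR j) = pvR (j + 1) := by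
            rw [ht, h1, show pvBlockOf pvParas = pvBlock from rfl, ← pvR_succ]
          rw [hs]
          apply ih
          have hbp := pvBlock_pos
          have hl1 : (pvR (j + 1)).length = (pvR j).length + pvBlock.length := by
            rw [pvR_succ]; simp
          omega
        · have hlen : n ≤ ((pvInner n pvParas (pvR j)).length : Int) := by
            rw [ht]; simpa using h2
          rw [pvWhile, if_neg (by omega)]
          refine ⟨j + 1, ?_, hlen⟩
          obtain ⟨u, hu⟩ := hpre
          refine ⟨u, ?_⟩
          rw [ht, pvR_succ, show pvBlock = pvBlockOf pvParas from rfl, ← hu, List.append_assoc]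
      · rw [pvWhile, if_neg h]
        exact ⟨j, List.prefix_refl _, by omega⟩

theorem take_eq_of_prefix {p q : List Char} {t : Nat} (h : p <+: q) (hl : t ≤ p.length) :
    p.take t = q.take t := by
  obtain ⟨u, rfl⟩ := h
  rw [List.take_append_of_le_length hl]

-- ===== VERDICT (by name: the statement is the Claim_ definition above) =====
theorem builtin_long_doc_spec : Claim_equal_builtin_long_doc := by
  intro n _
  unfold Spec_builtin_long_doc
  simp only [builtin_long_doc, builtin_long_doc_alt]
  rw [show (pvParas.map (fun p => p.toList ++ ['\n', '\n'])).flatten = pvBlock from rfl]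
  have hL : (0 : Int) < (pvBlock.length : Int) := by exact_mod_cast pvBlock_pos
  have hfd : PySem.Int.floordiv n (pvBlock.length : Int) = n / (pvBlock.length : Int) :=
    PySem.Int.floordiv_eq_ediv_of_pos hL
  rw [hfd]
  by_cases hn : n ≤ 0
  · -- both sides are empty
    have hA : pvWhile n [] = [] := by
      rw [pvWhile, if_neg (by simp only [List.length_nil, Nat.cast_zero]; omega)]
    rw [hA]
    rcases lt_or_eq_of_le hn with hlt | heq
    · have hdiv : n / (pvBlock.length : Int) < 0 := Int.ediv_neg_of_neg_of_pos hlt hL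
      have hreps : (n / (pvBlock.length : Int) + 1).toNat = 0 := by omega
      have hB : PySem.List.pyRepeat pvBlock (n / (pvBlock.length : Int) + 1) = [] := by
        rw [PySem.List.pyRepeat, hreps]; rfl
      rw [hB]
    · subst heq
      rw [PySem.List.slice_to _ (by omega), PySem.List.slice_to _ (by omega)]
      simp only [Int.toNat_zero, List.take_zero]
  · push_neg at hn
    have h0 : ([] : List Char) = pvR 0 := rfl
    rw [h0]
    obtain ⟨k, hpre, hlen⟩ := pvWhile_good n (n - ((pvR 0).length : Int)).toNat 0 le_rfl
    set L : Int := (pvBlock.length : Int) with hLdef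
    have hreps0 : 0 ≤ n / L + 1 := by
      have := Int.ediv_nonneg (le_of_lt hn) (le_of_lt hL); omega
    have hBrep : PySem.List.pyRepeat pvBlock (n / L + 1) = pvR (n / L + 1).toNat := rfl
    have hBlen : n ≤ (((pvR (n / L + 1).toNat).length : Int)) := by
      have hmod1 : 0 ≤ n % L := Int.emod_nonneg n (by omega)
      have hmod2 : n % L < L := Int.emod_lt_of_pos n hL
      have hde : L * (n / L) + n % L = n := Int.ediv_add_emod n L
      have hlt : n < (n / L + 1) * L := by nlinarith
      rw [pvR_length]
      push_cast
      rw [Int.toNat_of_nonneg hreps0]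
      nlinarith
    rw [hBrep]
    rw [PySem.List.slice_to _ (by omega), PySem.List.slice_to _ (by omega)]
    congr 1
    set r := pvWhile n (pvR 0)
    set M := (n / L + 1).toNat
    have h1 : r <+: pvR (max k M) := hpre.trans (pvR_prefix (le_max_left _ _))
    have h2 : pvR M <+: pvR (max k M) := pvR_prefix (le_max_right _ _)
    rw [take_eq_of_prefix h1 (by omega), take_eq_of_prefix h2 (by omega)]
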